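-- pv_equiv track=rewrite | github.com/piratajack/ejemplos | clasificasion_estudiantes.py | clasificar_estudiantes
-- ===== SOURCE A (Python) =====
-- def clasificar_estudiantes(lista_estudiantes):     #definimos la funcion clasificar_estudiantes que recibe una lista d eestudiantes
--     clasificacion = {   #creamos un diccionario con tres claves alto,medio,bajo
--         "alto": [],
--         "medio": [],
--         "bajo": []
--     }
--
--     for nombre, calificacion in lista_estudiantes:         #recorremos cada tupla, cada tupla se compone en nombre y clasificasion
--         if calificacion >= 90:                             #Si la nota es 90 o más, se agrega el nombre a la lista "alto"
--             clasificacion["alto"].append(nombre)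
--         elif 70 <= calificacion <= 89:       #             Si está entre 70 y 89, va a "medio"
--             clasificacion["medio"].append(nombre)
--         else:                                              #Si es menor que 70, va a "bajo"
--             clasificacion["bajo"].append(nombre)
--
--     return clasificacion                         #devolvemos el reultado con los nombres clasificados
-- ===== SOURCE B (Python) =====
-- def clasificar_estudiantes(lista_estudiantes):
--     alto = [n for n, c in lista_estudiantes if c >= 90]
--     medio = [n for n, c in lista_estudiantes if 70 <= c <= 89]
--     bajo = [n for n, c in lista_estudiantes if not (c >= 90) and not (70 <= c <= 89)]
--     return {"alto": alto, "medio": medio, "bajo": bajo}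
-- ===== Notes on version B (the rewrite author's own statement) =====
-- stated objective: alternative
-- what changed: Replaces the single dispatch loop appending into a pre-built dict by three independent filtering passes (one comprehension per bucket) assembled into the dict at the end.
import Mathlib
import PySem

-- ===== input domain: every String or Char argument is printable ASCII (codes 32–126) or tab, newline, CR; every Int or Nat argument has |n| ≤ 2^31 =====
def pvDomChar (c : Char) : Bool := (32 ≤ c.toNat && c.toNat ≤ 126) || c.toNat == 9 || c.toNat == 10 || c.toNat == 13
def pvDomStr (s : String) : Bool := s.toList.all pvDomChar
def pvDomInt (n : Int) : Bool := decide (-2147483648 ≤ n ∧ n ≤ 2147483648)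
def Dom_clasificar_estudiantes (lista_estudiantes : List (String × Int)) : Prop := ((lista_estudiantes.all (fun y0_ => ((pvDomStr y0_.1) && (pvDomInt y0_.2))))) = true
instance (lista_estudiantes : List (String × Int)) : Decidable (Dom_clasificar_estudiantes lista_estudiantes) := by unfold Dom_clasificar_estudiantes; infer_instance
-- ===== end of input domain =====

-- B replaces A's single dispatch loop into a pre-built dict by three independent filtering passes, one per bucket (alternative decomposition, same cost).

-- ===== PORT A =====
def clasificar_estudiantes (lista_estudiantes : List (String × Int)) : List (String × List String) :=
  let clasificacion : PySem.Dict String (List String) :=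
    PySem.Dict.mk [("alto", []), ("medio", []), ("bajo", [])]
  let final := lista_estudiantes.foldl (fun d p =>
    if p.2 ≥ 90 then d.modify "alto" [] (· ++ [p.1])
    else if 70 ≤ p.2 ∧ p.2 ≤ 89 then d.modify "medio" [] (· ++ [p.1])
    else d.modify "bajo" [] (· ++ [p.1])) clasificacion
  final.items

-- ===== PORT B =====
def clasificar_estudiantes_alt (lista_estudiantes : List (String × Int)) : List (String × List String) :=
  let alto := (lista_estudiantes.filter (fun p => p.2 ≥ 90)).map (·.1)
  let medio := (lista_estudiantes.filter (fun p => 70 ≤ p.2 ∧ p.2 ≤ 89)).map (·.1)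
  let bajo := (lista_estudiantes.filter (fun p => ¬ (p.2 ≥ 90) ∧ ¬ (70 ≤ p.2 ∧ p.2 ≤ 89))).map (·.1)
  (PySem.Dict.mk [("alto", alto), ("medio", medio), ("bajo", bajo)]).items

-- ===== PRECONDITION & SPEC =====
def Spec_clasificar_estudiantes (lista_estudiantes : List (String × Int)) (out : List (String × List String)) : Prop := out = clasificar_estudiantes_alt lista_estudiantes
instance (lista_estudiantes : List (String × Int)) (out : List (String × List String)) : Decidable (Spec_clasificar_estudiantes lista_estudiantes out) := by unfold Spec_clasificar_estudiantes; infer_instance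

-- ===== CLAIM (what is proved, stated in full; the proofs are below) =====
def Claim_equal_clasificar_estudiantes : Prop := ∀ (lista_estudiantes : List (String × Int)), Dom_clasificar_estudiantes lista_estudiantes → Spec_clasificar_estudiantes lista_estudiantes (clasificar_estudiantes lista_estudiantes)

-- ===== LEMMAS AND PROOFS =====

-- Loop invariant: folding A's dispatch step over l starting from the three buckets (a, m, b)
-- appends exactly the three filtered name lists of B.
theorem clasif_fold_inv (l : List (String × Int)) (a m b : List String) :
    (l.foldl (fun d p =>
        if p.2 ≥ 90 then d.modify "alto" [] (· ++ [p.1])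
        else if 70 ≤ p.2 ∧ p.2 ≤ 89 then d.modify "medio" [] (· ++ [p.1])
        else d.modify "bajo" [] (· ++ [p.1]))
      (PySem.Dict.mk [("alto", a), ("medio", m), ("bajo", b)])).items
    = [("alto", a ++ (l.filter (fun p => p.2 ≥ 90)).map (·.1)),
       ("medio", m ++ (l.filter (fun p => 70 ≤ p.2 ∧ p.2 ≤ 89)).map (·.1)),
       ("bajo", b ++ (l.filter (fun p => ¬ (p.2 ≥ 90) ∧ ¬ (70 ≤ p.2 ∧ p.2 ≤ 89))).map (·.1))] := by
  induction l generalizing a m b with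
  | nil => simp [PySem.Dict.items]
  | cons hd tl ih =>
    simp only [List.foldl_cons]
    by_cases h1 : hd.2 ≥ 90
    · have : (PySem.Dict.mk [("alto", a), ("medio", m), ("bajo", b)]).modify "alto" [] (· ++ [hd.1])
          = PySem.Dict.mk [("alto", a ++ [hd.1]), ("medio", m), ("bajo", b)] := by
        simp [PySem.Dict.modify, PySem.Dict.contains, PySem.Dict.insert, PySem.Dict.getD, PySem.Dict.get?]
      rw [if_pos h1, this, ih]
      have e1 : decide (hd.2 ≥ 90) = true := by simpa using h1
      have e2 : ¬ (70 ≤ hd.2 ∧ hd.2 ≤ 89) := by omega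
      simp [h1, e2]
    · by_cases h2 : 70 ≤ hd.2 ∧ hd.2 ≤ 89
      · have : (PySem.Dict.mk [("alto", a), ("medio", m), ("bajo", b)]).modify "medio" [] (· ++ [hd.1])
            = PySem.Dict.mk [("alto", a), ("medio", m ++ [hd.1]), ("bajo", b)] := by
          simp [PySem.Dict.modify, PySem.Dict.contains, PySem.Dict.insert, PySem.Dict.getD, PySem.Dict.get?]
        rw [if_neg h1, if_pos h2, this, ih]
        simp [h1, h2]
      · have : (PySem.Dict.mk [("alto", a), ("medio", m), ("bajo", b)]).modify "bajo" [] (· ++ [hd.1])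
            = PySem.Dict.mk [("alto", a), ("medio", m), ("bajo", b ++ [hd.1])] := by
          simp [PySem.Dict.modify, PySem.Dict.contains, PySem.Dict.insert, PySem.Dict.getD, PySem.Dict.get?]
        rw [if_neg h1, if_neg h2, this, ih]
        have e1 : hd.2 < 90 := by omega
        have e2 : hd.2 < 70 ∨ 89 < hd.2 := by omega
        simp [h1, h2, e1, e2]

-- ===== VERDICT (by name: the statement is the Claim_ definition above) =====
theorem clasificar_estudiantes_spec : Claim_equal_clasificar_estudiantes := by
  intro l _
  show clasificar_estudiantes l = clasificar_estudiantes_alt l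
  simp only [clasificar_estudiantes, clasificar_estudiantes_alt]
  rw [clasif_fold_inv]
  rfl
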